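-- pv_equiv track=rewrite | github.com/juandarr/ProjectEuler | 121.py | prize_allocation
-- ===== SOURCE A (Python) =====
-- from itertools import combinations
--
-- def prize_allocation(limit_n):
--     '''
--     returns the maximum prize fund that should be allocated to single random game of limit_n trials
--     '''
--     total = 1
--     trials = limit_n
--     for r in range(trials//2+1,trials):
--         elems = [ i for i in range(trials)]
--         for comb in combinations(elems,r):
--             value = 1
--             ar_cp = elems.copy()
--             for c in comb:
--                 ar_cp.remove(c)
--             for el in ar_cp:
--                 value *= (el+1)
--             total += value
--     den = 1
--     for i in range(2,trials+2):
--         den *=i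
--     return den//total
-- ===== SOURCE B (Python) =====
-- def prize_allocation(limit_n):
--     '''
--     returns the maximum prize fund that should be allocated to single random game of limit_n trials
--     '''
--     if limit_n <= 0:
--         return 1
--     n = limit_n
--     # e[k] = elementary symmetric polynomial e_k(1..i) after processing i
--     e = [1]
--     for i in range(1, n + 1):
--         e = [a + i * b for a, b in zip(e + [0], [0] + e)]
--     total = sum(e[:(n + 1) // 2])
--     fact = 1
--     for i in range(2, n + 2):
--         fact *= i
--     return fact // total
-- ===== Notes on version B (the rewrite author's own statement) =====
-- stated objective: faster
-- what changed: replaces the exponential enumeration of all combinations (with per-combination list.remove complement products) by an O(n^2) DP computing the elementary symmetric polynomials of 1..n as coefficients of prod(x+i), summing the coefficients for blue-majority outcomes; intended as faster: in a timing run A timed out where B returned, so no ratio at the largest size could be confirmed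
import Mathlib
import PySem

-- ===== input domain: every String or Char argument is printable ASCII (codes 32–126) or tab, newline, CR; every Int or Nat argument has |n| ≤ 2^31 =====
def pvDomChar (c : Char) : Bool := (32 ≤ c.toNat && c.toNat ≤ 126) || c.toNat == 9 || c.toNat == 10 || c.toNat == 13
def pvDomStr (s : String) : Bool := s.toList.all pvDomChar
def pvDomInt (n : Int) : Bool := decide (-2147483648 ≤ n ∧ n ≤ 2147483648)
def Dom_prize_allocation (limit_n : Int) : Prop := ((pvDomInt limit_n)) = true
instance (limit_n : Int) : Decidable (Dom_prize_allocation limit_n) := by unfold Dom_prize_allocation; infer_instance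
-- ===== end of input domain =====

-- B replaces A's exponential enumeration of combinations by an elementary-symmetric-polynomial DP (coefficients of prod(x+i)); intended as faster (A times out on that run's larger inputs, so a timing run could not confirm a ratio); same return value.


-- ===== PORT A =====
-- itertools.combinations(xs, r) in lexicographic (Python) order
def pvCombs : List Int → Nat → List (List Int)
  | _, 0 => [[]]
  | [], _ + 1 => []
  | x :: xs, r + 1 => ((pvCombs xs r).map (fun c => x :: c)) ++ pvCombs xs (r + 1)

-- list.remove(c): removes the first occurrence. Python raises ValueError when c is absent;
-- in A every removed element is a member of the list (comb ⊆ elems), so this total form is exact on all reachable states.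
def pvRemoveFirst (l : List Int) (c : Int) : List Int :=
  match l with
  | [] => []
  | y :: ys => if y = c then ys else y :: pvRemoveFirst ys c

def prize_allocation (limit_n : Int) : Int :=
  let trials := limit_n
  let total : Int :=
    (PySem.List.pyRange (PySem.Int.floordiv trials 2 + 1) trials).foldl (fun total r =>
      let elems := PySem.List.pyRange 0 trials
      -- r.toNat: every r drawn from this range satisfies 2 ≤ r (itertools would raise only on r < 0, unreachable)
      (pvCombs elems r.toNat).foldl (fun total comb =>
        let value : Int := 1
        let ar_cp := comb.foldl pvRemoveFirst elems
        let value := ar_cp.foldl (fun value el => value * (el + 1)) value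
        total + value) total) 1
  let den : Int := (PySem.List.pyRange 2 (trials + 2)).foldl (fun den i => den * i) 1
  PySem.Int.floordiv den total

-- ===== PORT B =====
def prize_allocation_alt (limit_n : Int) : Int :=
  if limit_n ≤ 0 then 1
  else
    let n := limit_n
    -- e = [a + i * b for a, b in zip(e + [0], [0] + e)]
    let e : List Int :=
      (PySem.List.pyRange 1 (n + 1)).foldl (fun e i =>
        List.zipWith (fun a b => a + i * b) (e ++ [0]) (0 :: e)) [1]
    let total : Int := (PySem.List.slice e none (some (PySem.Int.floordiv (n + 1) 2))).sum
    let fact : Int := (PySem.List.pyRange 2 (n + 2)).foldl (fun fact i => fact * i) 1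
    PySem.Int.floordiv fact total

-- ===== PRECONDITION & SPEC =====
def Spec_prize_allocation (limit_n : Int) (out : Int) : Prop := out = prize_allocation_alt limit_n
instance (limit_n : Int) (out : Int) : Decidable (Spec_prize_allocation limit_n out) := by unfold Spec_prize_allocation; infer_instance

-- ===== CLAIM (what is proved, stated in full; the proofs are below) =====
def Claim_equal_prize_allocation : Prop := ∀ (limit_n : Int), Dom_prize_allocation limit_n → Spec_prize_allocation limit_n (prize_allocation limit_n)

-- ===== LEMMAS AND PROOFS =====

-- product of (x+1) over a list
def pvP (l : List Int) : Int := (l.map (· + 1)).prod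
-- sum over r-combinations of xs of the product of (x+1) over the CHOSEN elements
def pvF (xs : List Int) (k : Nat) : Int := ((pvCombs xs k).map pvP).sum
-- sum over r-combinations of xs of the product of (x+1) over the COMPLEMENT (what A computes per r)
def pvG (xs : List Int) (k : Nat) : Int :=
  ((pvCombs xs k).map (fun c => pvP (c.foldl pvRemoveFirst xs))).sum

theorem pvP_cons (x : Int) (l : List Int) : pvP (x :: l) = (x + 1) * pvP l := by
  simp [pvP]

theorem foldl_mul_pvP (l : List Int) (a : Int) :
    l.foldl (fun v el => v * (el + 1)) a = a * pvP l := by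
  induction l generalizing a with
  | nil => simp [pvP]
  | cons x xs ih => simp [List.foldl_cons, ih, pvP_cons]; ring

theorem pvCombs_eq_nil (xs : List Int) (k : Nat) (h : xs.length < k) : pvCombs xs k = [] := by
  induction xs generalizing k with
  | nil => cases k with | zero => omega | succ k => rfl
  | cons x xs ih =>
    cases k with
    | zero => omega
    | succ k =>
      simp only [pvCombs, List.append_eq_nil_iff, List.map_eq_nil_iff]
      constructor
      · exact ih k (by simp at h; omega)
      · exact ih (k+1) (by simp at h; omega)

theorem mem_pvCombs_mem (xs : List Int) (k : Nat) (c : List Int) (hc : c ∈ pvCombs xs k) :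
    ∀ y ∈ c, y ∈ xs := by
  induction xs generalizing k c with
  | nil =>
    cases k with
    | zero => simp [pvCombs] at hc; simp [hc]
    | succ k => simp [pvCombs] at hc
  | cons x xs ih =>
    cases k with
    | zero => simp [pvCombs] at hc; simp [hc]
    | succ k =>
      simp only [pvCombs, List.mem_append, List.mem_map] at hc
      rcases hc with ⟨c', hc', rfl⟩ | hc
      · intro y hy
        rcases List.mem_cons.mp hy with rfl | hy
        · exact List.mem_cons_self
        · exact List.mem_cons_of_mem _ (ih k c' hc' y hy)
      · intro y hy; exact List.mem_cons_of_mem _ (ih (k+1) c hc y hy)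

theorem foldl_remove_cons (c : List Int) (x : Int) (l : List Int) (h : ∀ y ∈ c, y ≠ x) :
    c.foldl pvRemoveFirst (x :: l) = x :: c.foldl pvRemoveFirst l := by
  induction c generalizing l with
  | nil => rfl
  | cons y ys ih =>
    have hy : y ≠ x := h y List.mem_cons_self
    simp only [List.foldl_cons]
    rw [show pvRemoveFirst (x :: l) y = x :: pvRemoveFirst l y by
      simp [pvRemoveFirst, (Ne.symm hy)]]
    exact ih (pvRemoveFirst l y) (fun z hz => h z (List.mem_cons_of_mem _ hz))

theorem pvF_zero (xs : List Int) : pvF xs 0 = 1 := by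
  cases xs <;> simp [pvF, pvCombs, pvP]

theorem pvF_eq_zero (xs : List Int) (k : Nat) (h : xs.length < k) : pvF xs k = 0 := by
  simp [pvF, pvCombs_eq_nil xs k h]

theorem pvF_cons_succ (x : Int) (xs : List Int) (k : Nat) :
    pvF (x :: xs) (k + 1) = (x + 1) * pvF xs k + pvF xs (k + 1) := by
  simp only [pvF, pvCombs, List.map_append, List.map_map, List.sum_append]
  congr 1
  · rw [show (pvP ∘ fun c => x :: c) = (fun c => (x + 1) * pvP c) from funext (fun c => pvP_cons x c)]
    exact PySem.List.sum_map_const_mul_int _ _ _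

theorem pvG_zero (xs : List Int) : pvG xs 0 = pvP xs := by
  cases xs <;> simp [pvG, pvCombs]

theorem pvG_eq_zero (xs : List Int) (k : Nat) (h : xs.length < k) : pvG xs k = 0 := by
  simp [pvG, pvCombs_eq_nil xs k h]

theorem pvG_cons_succ (x : Int) (xs : List Int) (k : Nat) (hx : x ∉ xs) :
    pvG (x :: xs) (k + 1) = pvG xs k + (x + 1) * pvG xs (k + 1) := by
  simp only [pvG, pvCombs, List.map_append, List.map_map, List.sum_append]
  congr 1
  · congr 1
    apply List.map_congr_left
    intro c _
    simp only [Function.comp_apply, List.foldl_cons]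
    rw [show pvRemoveFirst (x :: xs) x = xs by simp [pvRemoveFirst]]
  · rw [List.map_congr_left (g := fun c => (x + 1) * pvP (c.foldl pvRemoveFirst xs)) ?_]
    · exact PySem.List.sum_map_const_mul_int _ _ _
    · intro c hc
      have hmem := mem_pvCombs_mem xs (k+1) c hc
      rw [foldl_remove_cons c x xs (fun y hy h' => hx (h' ▸ hmem y hy)), pvP_cons]

-- the complement sum over r-combinations is the chosen-product sum over (|xs|-r)-combinations
theorem pvG_eq_pvF (xs : List Int) (hnd : xs.Nodup) :
    ∀ k, k ≤ xs.length → pvG xs k = pvF xs (xs.length - k) := by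
  induction xs with
  | nil =>
    intro k hk
    have hk0 : k = 0 := by simpa using hk
    subst hk0; simp [pvG_zero, pvF_zero, pvP]
  | cons x xs ih =>
    have hx : x ∉ xs := (List.nodup_cons.mp hnd).1
    have hnd' := (List.nodup_cons.mp hnd).2
    intro k hk
    cases k with
    | zero =>
      have h0 := ih hnd' 0 (by omega)
      rw [pvG_zero, Nat.sub_zero] at h0
      rw [pvG_zero, pvP_cons, List.length_cons, Nat.sub_zero, pvF_cons_succ,
        pvF_eq_zero xs (xs.length + 1) (by omega), ← h0]
      ring
    | succ k =>
      rw [pvG_cons_succ x xs k hx]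
      by_cases hke : k = xs.length
      · subst hke
        rw [pvG_eq_zero xs (xs.length + 1) (by omega), ih hnd' xs.length le_rfl]
        simp [pvF_zero]
      · have hk' : k + 1 ≤ xs.length := by simp at hk; omega
        rw [ih hnd' k (by omega), ih hnd' (k+1) hk']
        have h1 : xs.length - k = (xs.length - (k+1)) + 1 := by omega
        have h2 : (x :: xs).length - (k+1) = (xs.length - (k+1)) + 1 := by simp; omega
        rw [h1, h2, pvF_cons_succ]
        ring

-- appending one element to the factor list: Pascal-style recurrence for pvF
theorem pvF_append_single (xs : List Int) (y : Int) (k : Nat) :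
    pvF (xs ++ [y]) (k + 1) = pvF xs (k + 1) + (y + 1) * pvF xs k := by
  induction xs generalizing k with
  | nil =>
    cases k with
    | zero => simp [pvF, pvCombs, pvP]
    | succ k =>
      rw [List.nil_append, pvF_eq_zero [] (k+1+1) (by simp), pvF_eq_zero [] (k+1) (by simp)]
      have : pvF [y] (k + 1 + 1) = 0 := pvF_eq_zero [y] (k+2) (by simp)
      rw [this]; ring
  | cons x xs ih =>
    cases k with
    | zero =>
      rw [List.cons_append, pvF_cons_succ, pvF_cons_succ, pvF_zero (x :: xs),
        pvF_zero (xs ++ [y]), ih 0, pvF_zero]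
      ring
    | succ k =>
      rw [List.cons_append, pvF_cons_succ, pvF_cons_succ, ih k, ih (k+1), pvF_cons_succ]
      ring

-- B's DP state after processing factors 1..m
def pvE (m : Nat) : List Int :=
  (List.range (m + 1)).map (fun k => pvF (PySem.List.pyRange 0 (m : Int)) k)

theorem pvE_step (m : Nat) :
    List.zipWith (fun a b => a + ((m : Int) + 1) * b) (pvE m ++ [0]) (0 :: pvE m) = pvE (m + 1) := by
  have hlenR : (PySem.List.pyRange 0 (m : Int)).length = m := by
    rw [PySem.List.length_pyRange_one]; omega
  have hRm1 : PySem.List.pyRange 0 (((m + 1 : Nat)) : Int)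
      = PySem.List.pyRange 0 (m : Int) ++ [(m : Int)] := by
    rw [show (((m + 1 : Nat)) : Int) = (m : Int) + 1 by push_cast; ring,
      PySem.List.pyRange_one_succ_right (by omega)]
  apply List.ext_getElem
  · simp [pvE]
  · intro i h1 h2
    have hi : i < m + 2 := by simp [pvE] at h2; omega
    rw [List.getElem_zipWith]
    have hgetE : ∀ (j : Nat) (hj : j < m + 1), (pvE m)[j]'(by simp [pvE]; omega) =
        pvF (PySem.List.pyRange 0 (m : Int)) j := by
      intro j hj; simp [pvE]
    have htgt : (pvE (m+1))[i]'(h2) = pvF (PySem.List.pyRange 0 (m : Int) ++ [(m : Int)]) i := by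
      simp only [pvE, List.getElem_map, List.getElem_range]
      rw [hRm1]
    rw [htgt]
    rcases i with _ | j
    · rw [pvF_zero]
      rw [List.getElem_append_left (by simp [pvE]), List.getElem_cons_zero, hgetE 0 (by omega),
        pvF_zero]
      ring
    · rw [pvF_append_single]
      rw [List.getElem_cons_succ, hgetE j (by omega)]
      by_cases hj : j + 1 < m + 1
      · rw [List.getElem_append_left (by simp [pvE]; omega), hgetE (j+1) hj]
      · have hj1 : j + 1 = m + 1 := by omega
        rw [List.getElem_append_right (by simp [pvE]; omega)]
        rw [pvF_eq_zero _ (j+1) (by omega)]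
        simp

theorem pvE_fold (m : Nat) :
    (PySem.List.pyRange 1 ((m : Int) + 1)).foldl
      (fun e i => List.zipWith (fun a b => a + i * b) (e ++ [0]) (0 :: e)) [1] = pvE m := by
  induction m with
  | zero => simp [PySem.List.pyRange_one_eq_nil, pvE, pvF_zero]
  | succ m ih =>
    rw [show (((m + 1 : Nat) : Int) + 1 : Int) = ((m : Int) + 1) + 1 by push_cast; ring,
      PySem.List.pyRange_one_succ_right (by omega), List.foldl_append, ih]
    simpa using pvE_step m

theorem sum_map_range (n : Nat) (f : Nat → Int) :
    ((List.range n).map f).sum = ∑ k ∈ Finset.range n, f k := by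
  induction n with
  | zero => simp
  | succ m ih => rw [List.range_succ, Finset.sum_range_succ]; simp [ih]

-- A's accumulated total for n ≥ 1 equals the sum of the low-half elementary symmetric coefficients
theorem totals_eq (nn : Nat) (h1 : 1 ≤ nn) :
    (1 : Int) + ((PySem.List.pyRange (PySem.Int.floordiv (nn : Int) 2 + 1) (nn : Int)).map
        (fun r => pvG (PySem.List.pyRange 0 (nn : Int)) r.toNat)).sum
      = ∑ k ∈ Finset.range ((nn + 1) / 2), pvF (PySem.List.pyRange 0 (nn : Int)) k := by
  have hlenR : (PySem.List.pyRange 0 (nn : Int)).length = nn := by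
    rw [PySem.List.length_pyRange_one]; omega
  have hnd := PySem.List.nodup_pyRange_one 0 (nn : Int)
  have hfd : PySem.Int.floordiv (nn : Int) 2 = ((nn / 2 : Nat) : Int) := by
    exact_mod_cast PySem.Int.floordiv_natCast nn 2
  set L : Nat := nn - (nn / 2 + 1) with hL
  have ha : nn / 2 + 1 ≤ nn := by omega
  rw [hfd, PySem.List.pyRange_one (((nn / 2 : Nat) : Int) + 1) (nn : Int)]
  have harg : ((nn : Int) - (((nn / 2 : Nat) : Int) + 1)).toNat = L := by omega
  rw [harg, List.map_map]
  have hcong : ((List.range L).map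
        ((fun r => pvG (PySem.List.pyRange 0 (nn : Int)) r.toNat)
          ∘ fun (k : Nat) => ((nn / 2 : Nat) : Int) + 1 + (k : Int)))
      = (List.range L).map (fun k => pvF (PySem.List.pyRange 0 (nn : Int)) (L - k)) := by
    apply List.map_congr_left
    intro k hk
    have hkL : k < L := List.mem_range.mp hk
    have htn : (((nn / 2 : Nat) : Int) + 1 + (k : Int)).toNat = nn / 2 + 1 + k := by omega
    simp only [Function.comp_apply, htn]
    rw [pvG_eq_pvF _ hnd _
      (by omega : nn / 2 + 1 + k ≤ (PySem.List.pyRange 0 (nn : Int)).length)]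
    rw [hlenR]
    congr 1
    omega
  rw [hcong, sum_map_range]
  have hrefl : ∑ k ∈ Finset.range L, pvF (PySem.List.pyRange 0 (nn : Int)) (L - k)
      = ∑ k ∈ Finset.range L, pvF (PySem.List.pyRange 0 (nn : Int)) (k + 1) := by
    rw [← Finset.sum_range_reflect (fun j => pvF (PySem.List.pyRange 0 (nn : Int)) (j + 1)) L]
    apply Finset.sum_congr rfl
    intro k hk
    have : k < L := Finset.mem_range.mp hk
    congr 1
    omega
  rw [hrefl]
  have hM : (nn + 1) / 2 = L + 1 := by omega
  rw [hM, Finset.sum_range_succ' (fun k => pvF (PySem.List.pyRange 0 (nn : Int)) k) L, pvF_zero]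
  ring

theorem prize_allocation_eq (limit_n : Int) :
    prize_allocation limit_n = prize_allocation_alt limit_n := by
  by_cases hn : limit_n ≤ 0
  · have hq := PySem.Int.floordiv_mul_add_mod limit_n 2
    have hm0 := PySem.Int.mod_nonneg limit_n (by omega : (0:Int) < 2)
    have hm1 := PySem.Int.mod_lt limit_n (by omega : (0:Int) < 2)
    simp only [prize_allocation, prize_allocation_alt, if_pos hn]
    rw [PySem.List.pyRange_one_eq_nil (by omega : limit_n ≤ PySem.Int.floordiv limit_n 2 + 1),
      PySem.List.pyRange_one_eq_nil (by omega : limit_n + 2 ≤ 2)]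
    simp [List.foldl]
  · have h1 : (1 : Int) ≤ limit_n := by omega
    obtain ⟨nn, rfl⟩ : ∃ nn : Nat, limit_n = (nn : Int) :=
      ⟨limit_n.toNat, by omega⟩
    have h1n : 1 ≤ nn := by omega
    simp only [prize_allocation, prize_allocation_alt, if_neg hn]
    -- A's inner loops: product fold, then foldl_add twice
    simp only [foldl_mul_pvP, one_mul, PySem.List.foldl_add]
    -- fold the per-r sum into pvG
    have hA : (1 : Int) + ((PySem.List.pyRange (PySem.Int.floordiv (nn : Int) 2 + 1) (nn : Int)).map
          (fun r => ((pvCombs (PySem.List.pyRange 0 (nn : Int)) r.toNat).map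
            (fun comb => pvP (comb.foldl pvRemoveFirst (PySem.List.pyRange 0 (nn : Int))))).sum)).sum
        = ∑ k ∈ Finset.range ((nn + 1) / 2), pvF (PySem.List.pyRange 0 (nn : Int)) k :=
      totals_eq nn h1n
    rw [hA]
    -- B's total
    rw [pvE_fold nn]
    have hfd2 : PySem.Int.floordiv ((nn : Int) + 1) 2 = (((nn + 1) / 2 : Nat) : Int) := by
      exact_mod_cast PySem.Int.floordiv_natCast (nn + 1) 2
    rw [hfd2, PySem.List.slice_to _ (by omega)]
    have htoNat : ((((nn + 1) / 2 : Nat) : Int)).toNat = (nn + 1) / 2 := by omega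
    rw [htoNat]
    unfold pvE
    rw [← List.map_take, List.take_range,
      show min ((nn + 1) / 2) (nn + 1) = (nn + 1) / 2 by omega, sum_map_range]

-- ===== VERDICT (by name: the statement is the Claim_ definition above) =====
theorem prize_allocation_spec : Claim_equal_prize_allocation := by
  intro n _
  unfold Spec_prize_allocation
  exact prize_allocation_eq n
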